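-- pv_equiv track=rewrite | github.com/mjafferiqbal18/leetcode | 3_Stacks/15_maximal_rectangle.py | makePrefixArr
-- ===== SOURCE A (Python) =====
-- def makePrefixArr(matrix):
--     rows=len(matrix)
--     cols=len(matrix[0])
--     prefixArr = [[0]*cols for _ in range(rows)]
--
--     for c in range(cols):
--         prefixArr[0][c]=int(matrix[0][c])
--
--     for r in range(1,rows):
--         for c in range(cols):
--             if matrix[r][c]!='0':
--                 prefixArr[r][c]=1+prefixArr[r-1][c]
--     return prefixArr
-- ===== SOURCE B (Python) =====
-- def _cellHeight(matrix, r, c):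
--     # scan upward from row r to the nearest '0' (or to row 0)
--     i = r
--     while i >= 1 and matrix[i][c] != '0':
--         i -= 1
--     if i == 0:
--         return r + int(matrix[0][c])
--     return r - i
--
--
-- def makePrefixArr(matrix):
--     rows = len(matrix)
--     cols = len(matrix[0])
--     out = [[int(matrix[0][c]) for c in range(cols)]]
--     for r in range(1, rows):
--         out.append([_cellHeight(matrix, r, c) for c in range(cols)])
--     return out
-- ===== Notes on version B (the rewrite author's own statement) =====
-- stated objective: alternative
-- what changed: Replaces the row-to-row DP (each row built from the previous row's counters) by a memoryless per-cell computation: each entry scans its column upward to the nearest '0' and returns the closed form r - i, adding int(matrix[0][c]) when the run reaches row 0; no prefix state is carried between rows.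
import Mathlib
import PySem

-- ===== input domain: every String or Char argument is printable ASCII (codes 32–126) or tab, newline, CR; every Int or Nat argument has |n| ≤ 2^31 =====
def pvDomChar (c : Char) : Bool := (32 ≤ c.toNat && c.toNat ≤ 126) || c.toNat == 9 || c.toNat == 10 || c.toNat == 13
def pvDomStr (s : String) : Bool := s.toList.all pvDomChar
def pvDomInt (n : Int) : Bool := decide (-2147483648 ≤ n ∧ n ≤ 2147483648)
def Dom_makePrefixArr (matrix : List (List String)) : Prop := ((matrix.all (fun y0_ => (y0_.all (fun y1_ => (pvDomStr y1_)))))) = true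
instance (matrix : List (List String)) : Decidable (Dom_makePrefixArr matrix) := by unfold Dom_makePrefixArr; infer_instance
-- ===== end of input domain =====

-- B replaces A's row-to-row DP by a memoryless per-cell upward scan to the nearest '0'
-- (closed form r - i, seeded by int(matrix[0][c]) when the run reaches row 0);
-- objective: alternative algorithm, return-value equivalence on Pre_.

-- ===== PORT A =====
-- prefixArr[r][c] = v  (r, c nonnegative here)
def pySet2 (pa : List (List Int)) (r c : Int) (v : Int) : List (List Int) :=
  PySem.List.pySetD pa r (PySem.List.pySetD (PySem.List.pyGetD pa r []) c v)

def makePrefixArr (matrix : List (List String)) : List (List Int) :=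
  let rows : Int := matrix.length
  let cols : Int := (PySem.List.pyGetD matrix 0 []).length
  -- [[0]*cols for _ in range(rows)]
  let pa0 : List (List Int) := (PySem.List.pyRange 0 rows 1).map (fun _ => List.replicate cols.toNat 0)
  -- for c in range(cols): prefixArr[0][c] = int(matrix[0][c])
  let pa1 := (PySem.List.pyRange 0 cols 1).foldl (fun pa c =>
      pySet2 pa 0 c ((PySem.Int.ofStr? (PySem.List.pyGetD (PySem.List.pyGetD matrix 0 []) c "")).getD 0)) pa0
  -- for r in range(1, rows): for c in range(cols): if matrix[r][c] != '0': prefixArr[r][c] = 1 + prefixArr[r-1][c]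
  (PySem.List.pyRange 1 rows 1).foldl (fun pa r =>
      (PySem.List.pyRange 0 cols 1).foldl (fun pa c =>
        if PySem.List.pyGetD (PySem.List.pyGetD matrix r []) c "" ≠ "0"
        then pySet2 pa r c (1 + PySem.List.pyGetD (PySem.List.pyGetD pa (r - 1) []) c 0)
        else pa) pa) pa1

-- ===== PORT B =====
-- matrix[i][c] for the nonnegative indices B uses
def getCell (matrix : List (List String)) (i c : Nat) : String :=
  PySem.List.pyGetD (PySem.List.pyGetD matrix (i : Int) []) (c : Int) ""

-- the while loop of _cellHeight: i = r; while i >= 1 and matrix[i][c] != '0': i -= 1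
def scanUp (matrix : List (List String)) (c : Nat) : Nat → Nat
  | 0 => 0
  | i + 1 => if getCell matrix (i + 1) c ≠ "0" then scanUp matrix c i else i + 1

-- _cellHeight(matrix, r, c)
def cellHeight (matrix : List (List String)) (r c : Nat) : Int :=
  let i := scanUp matrix c r
  if i = 0 then (r : Int) + (PySem.Int.ofStr? (getCell matrix 0 c)).getD 0
  else (r : Int) - (i : Int)

def makePrefixArr_alt (matrix : List (List String)) : List (List Int) :=
  let rows := matrix.length
  let cols := (PySem.List.pyGetD matrix 0 []).length
  -- out = [[int(matrix[0][c]) for c in range(cols)]]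
  let out0 := (List.range cols).map (fun c => (PySem.Int.ofStr? (getCell matrix 0 c)).getD 0)
  -- for r in range(1, rows): out.append([_cellHeight(matrix, r, c) for c in range(cols)])
  out0 :: (List.range' 1 (rows - 1)).map (fun r => (List.range cols).map (fun c => cellHeight matrix r c))

-- ===== PRECONDITION & SPEC =====
-- Pre_ excludes exactly the inputs where A raises: the empty matrix (matrix[0] IndexError),
-- rows shorter than the first row (IndexError), and first-row entries int() cannot parse (ValueError).
def Pre_makePrefixArr (matrix : List (List String)) : Prop :=
  matrix ≠ [] ∧
  (∀ row ∈ matrix, (matrix.headD []).length ≤ row.length) ∧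
  (∀ s ∈ matrix.headD [], (PySem.Int.ofStr? s).isSome)
instance (matrix : List (List String)) : Decidable (Pre_makePrefixArr matrix) := by
  unfold Pre_makePrefixArr; infer_instance

def pvWitness_makePrefixArr : List (List String) := [["1", "0"], ["1", "1"], ["0", "1"]]

def Spec_makePrefixArr (matrix : List (List String)) (out : List (List Int)) : Prop := out = makePrefixArr_alt matrix
instance (matrix : List (List String)) (out : List (List Int)) : Decidable (Spec_makePrefixArr matrix out) := by unfold Spec_makePrefixArr; infer_instance

-- ===== CLAIM (what is proved, stated in full; the proofs are below) =====
def Claim_equal_makePrefixArr : Prop := ∀ (matrix : List (List String)), Dom_makePrefixArr matrix → Pre_makePrefixArr matrix → Spec_makePrefixArr matrix (makePrefixArr matrix)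

-- ===== LEMMAS AND PROOFS =====

-- A's DP, cell by cell (proof-side reference value)
def vval (matrix : List (List String)) (c : Nat) : Nat → Int
  | 0 => (PySem.Int.ofStr? (getCell matrix 0 c)).getD 0
  | r + 1 => if getCell matrix (r + 1) c ≠ "0" then vval matrix c r + 1 else 0

-- the DP value in terms of B's upward scan
theorem vval_eq_scan (matrix : List (List String)) (c : Nat) :
    ∀ r : Nat, vval matrix c r =
      if scanUp matrix c r = 0
      then (r : Int) + (PySem.Int.ofStr? (getCell matrix 0 c)).getD 0
      else (r : Int) - (scanUp matrix c r : Int) := by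
  intro r
  induction r with
  | zero => simp [vval, scanUp]
  | succ r ih =>
      by_cases h : getCell matrix (r + 1) c ≠ "0"
      · rw [show vval matrix c (r + 1) = vval matrix c r + 1 by simp [vval, h],
            show scanUp matrix c (r + 1) = scanUp matrix c r by simp [scanUp, h], ih]
        by_cases hz : scanUp matrix c r = 0
        · simp only [hz]; push_cast; ring
        · simp only [hz]; push_cast; ring
      · rw [show vval matrix c (r + 1) = 0 by simp [vval, h],
            show scanUp matrix c (r + 1) = r + 1 by simp [scanUp, h]]
        simp

theorem cellHeight_eq_vval (matrix : List (List String)) (r c : Nat) :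
    cellHeight matrix r c = vval matrix c r := by
  rw [vval_eq_scan]; rfl

-- B's row step and scan, proof-side description of A's loops
def stepRow (row : List String) (prev : List Int) : List Int :=
  (row.zip prev).map (fun q => if q.1 ≠ "0" then q.2 + 1 else 0)

def scanRows (prev : List Int) : List (List String) → List (List Int)
  | [] => []
  | row :: rest => stepRow row prev :: scanRows (stepRow row prev) rest

-- A's first loop only rewrites the head row
theorem foldl_pySet2_zero (g : Int → Int) :
    ∀ (cs : List Int) (h : List Int) (t : List (List Int)),
    cs.foldl (fun pa c => pySet2 pa 0 c (g c)) (h :: t)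
      = (cs.foldl (fun h c => PySem.List.pySetD h c (g c)) h) :: t := by
  intro cs
  induction cs with
  | nil => intro h t; rfl
  | cons c cs ih =>
      intro h t
      simp only [List.foldl_cons]
      rw [show pySet2 (h :: t) 0 c (g c)
            = (PySem.List.pySetD h c (g c)) :: t by
        simp [pySet2, PySem.List.pySetD_of_nonneg, PySem.List.pyGetD_of_nonneg]]
      exact ih _ t

-- setting positions 0..n-1 of a list, guarded by p
theorem foldl_setD_range (p : Int → Prop) [DecidablePred p] (g : Int → Int) :
    ∀ (n : Nat) (L : List Int), n ≤ L.length →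
    (PySem.List.pyRange 0 (n : Int) 1).foldl
        (fun h c => if p c then PySem.List.pySetD h c (g c) else h) L
      = (List.range n).map (fun (c : Nat) => if p (c : Int) then g (c : Int) else L.getD c 0) ++ L.drop n := by
  intro n
  induction n with
  | zero => intro L _; simp [PySem.List.pyRange_one_eq_nil]
  | succ n ih =>
      intro L hL
      have hn : n < L.length := by omega
      rw [show ((n + 1 : Nat) : Int) = (n : Int) + 1 by push_cast; ring,
          PySem.List.pyRange_one_succ_right (by positivity),
          List.foldl_append, ih L (by omega), List.range_succ, List.map_append,
          List.drop_eq_getElem_cons hn]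
      simp only [List.foldl_cons, List.foldl_nil, List.map_cons, List.map_nil]
      by_cases hp : p (n : Int)
      · rw [if_pos hp, if_pos hp, PySem.List.pySetD_natCast, List.set_append]
        simp only [List.length_map, List.length_range, lt_irrefl, if_false,
          Nat.sub_self, List.set_cons_zero]
        simp
      · rw [if_neg hp, if_neg hp]
        simp [List.getD_eq_getElem?_getD, List.getElem?_eq_getElem hn]

theorem map_range_pyGetD {α β : Type} (L : List α) (d : α) (f : α → β) :
    (List.range L.length).map (fun (c : Nat) => f (PySem.List.pyGetD L (c : Int) d)) = L.map f := by
  apply List.ext_getElem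
  · simp
  · intro i h1 h2
    simp only [List.getElem_map, List.getElem_range]
    rw [PySem.List.pyGetD_natCast]
    simp at h2
    simp [List.getElem?_eq_getElem h2]

-- A's inner loop only rewrites row r, reading the (unchanged) row r-1
theorem inner_gen (q : Int → Prop) [DecidablePred q] (v : List Int → Int → Int)
    (r : Int) (hr : 1 ≤ r) :
    ∀ (cs : List Int) (pa : List (List Int)), r < (pa.length : Int) →
    cs.foldl (fun pa c =>
        if q c then pySet2 pa r c (v (PySem.List.pyGetD pa (r - 1) []) c) else pa) pa
      = PySem.List.pySetD pa r
          (cs.foldl (fun h c =>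
              if q c then PySem.List.pySetD h c (v (PySem.List.pyGetD pa (r - 1) []) c) else h)
            (PySem.List.pyGetD pa r [])) := by
  intro cs
  induction cs with
  | nil =>
      intro pa hlt
      simp only [List.foldl_nil]
      rw [PySem.List.pySetD_of_nonneg _ _ (by omega),
          PySem.List.pyGetD_eq_getElem _ _ (by omega) hlt,
          List.set_getElem_self]
  | cons c cs ih =>
      intro pa hlt
      simp only [List.foldl_cons]
      by_cases hq : q c
      · rw [if_pos hq, if_pos hq]
        have h0r : (0 : Int) ≤ r := by omega
        have hRn : r.toNat < pa.length := by omega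
        have hne : r.toNat ≠ (r - 1).toNat := by omega
        set w := v (PySem.List.pyGetD pa (r - 1) []) c with hw
        have hset : pySet2 pa r c w
            = pa.set r.toNat (PySem.List.pySetD (PySem.List.pyGetD pa r []) c w) := by
          simp [pySet2, PySem.List.pySetD_of_nonneg _ _ h0r]
        rw [hset, ih _ (by simpa using hlt)]
        have hprev : PySem.List.pyGetD (pa.set r.toNat (PySem.List.pySetD (PySem.List.pyGetD pa r []) c w)) (r - 1) []
            = PySem.List.pyGetD pa (r - 1) [] := by
          rw [PySem.List.pyGetD_of_nonneg _ _ (by omega),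
              PySem.List.pyGetD_of_nonneg (i := r - 1) pa [] (by omega),
              List.getD_eq_getElem?_getD, List.getD_eq_getElem?_getD,
              List.getElem?_set_ne hne]
        have hcur : PySem.List.pyGetD (pa.set r.toNat (PySem.List.pySetD (PySem.List.pyGetD pa r []) c w)) r []
            = PySem.List.pySetD (PySem.List.pyGetD pa r []) c w := by
          rw [PySem.List.pyGetD_of_nonneg _ _ h0r, List.getD_eq_getElem?_getD,
              List.getElem?_set_self (by simpa using hRn)]
          rfl
        rw [hprev, hcur, PySem.List.pySetD_of_nonneg _ _ h0r,
            PySem.List.pySetD_of_nonneg _ _ h0r, List.set_set]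
      · rw [if_neg hq, if_neg hq]
        exact ih pa hlt

-- A's per-row result equals the zip-based row step
theorem rowmap_eq_stepRow (row : List String) (prev : List Int)
    (h : prev.length ≤ row.length) :
    (List.range prev.length).map (fun (c : Nat) =>
        if PySem.List.pyGetD row (c : Int) "" ≠ "0"
        then 1 + PySem.List.pyGetD prev (c : Int) 0 else 0)
      = stepRow row prev := by
  apply List.ext_getElem
  · simp [stepRow]; omega
  · intro i h1 h2
    have hiP : i < prev.length := by simp at h1; omega
    have hiR : i < row.length := by omega
    simp only [stepRow, List.getElem_map, List.getElem_range, List.getElem_zip]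
    rw [PySem.List.pyGetD_natCast, PySem.List.pyGetD_natCast,
        List.getD_eq_getElem _ _ hiR, List.getD_eq_getElem _ _ hiP]
    by_cases hz : row[i] = "0"
    · simp [hz]
    · simp [hz]; ring

-- the outer loop: rows front.length .. front.length+rest.length of A equal the scan
theorem outer_fold (matrix : List (List String)) (cols : Nat)
    (hcols : ∀ row ∈ matrix, cols ≤ row.length) :
    ∀ (rest : List (List String)) (front : List (List Int)) (prev : List Int),
    front ≠ [] →
    matrix.drop front.length = rest →
    front.getLast? = some prev →
    prev.length = cols →
    (PySem.List.pyRange (front.length : Int) ((front.length : Int) + rest.length) 1).foldl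
        (fun pa r =>
          (PySem.List.pyRange 0 (cols : Int) 1).foldl (fun pa c =>
            if PySem.List.pyGetD (PySem.List.pyGetD matrix r []) c "" ≠ "0"
            then pySet2 pa r c (1 + PySem.List.pyGetD (PySem.List.pyGetD pa (r - 1) []) c 0)
            else pa) pa)
        (front ++ List.replicate rest.length (List.replicate cols 0))
      = front ++ scanRows prev rest := by
  intro rest
  induction rest with
  | nil =>
      intro front prev _ _ _ _
      simp only [List.length_nil, List.replicate_zero, List.append_nil, Nat.cast_zero, add_zero]
      rw [PySem.List.pyRange_one_eq_nil (le_refl _)]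
      simp [scanRows]
  | cons row rest ih =>
      intro front prev hfne hdrop hlast hplen
      have hf1 : 1 ≤ front.length := List.length_pos_of_ne_nil hfne
      have hrowmem : row ∈ matrix := by
        have := List.drop_sublist front.length matrix
        rw [hdrop] at this
        exact this.subset List.mem_cons_self
      have hrowlen : cols ≤ row.length := hcols row hrowmem
      set f := front.length with hfdef
      have hcons : PySem.List.pyRange (f : Int) ((f : Int) + ((row :: rest).length : Nat)) 1
          = (f : Int) :: PySem.List.pyRange ((f : Int) + 1) ((f : Int) + (row :: rest).length) 1 := by
        apply PySem.List.pyRange_one_cons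
        simp only [List.length_cons]
        push_cast
        omega
      rw [hcons]
      simp only [List.foldl_cons, List.length_cons, List.replicate_succ]
      -- the first iteration (r = f)
      set pa : List (List Int) :=
        front ++ List.replicate cols 0 :: List.replicate rest.length (List.replicate cols 0) with hpadef
      have hpalen : ((f : Nat) : Int) < (pa.length : Int) := by
        simp only [hpadef, List.length_append, List.length_cons, List.length_replicate]
        push_cast
        omega
      have hrow0 : PySem.List.pyGetD pa (f : Int) [] = List.replicate cols 0 := by
        rw [PySem.List.pyGetD_natCast]
        simp only [hpadef, List.getD_eq_getElem?_getD]
        rw [List.getElem?_append_right (by omega)]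
        simp [hfdef]
      have hprevrow : PySem.List.pyGetD pa ((f : Int) - 1) [] = prev := by
        rw [PySem.List.pyGetD_of_nonneg _ _ (by omega)]
        have h1 : ((f : Int) - 1).toNat = f - 1 := by omega
        have h2 : f - 1 < front.length := by omega
        rw [h1, List.getD_eq_getElem?_getD, hpadef,
            List.getElem?_append_left h2]
        rw [List.getLast?_eq_getElem?] at hlast
        simp only [← hfdef] at hlast
        simp [hlast]
      have hmrow : PySem.List.pyGetD matrix (f : Int) [] = row := by
        rw [PySem.List.pyGetD_natCast]
        have : matrix[f]? = some row := by
          have h0 : (matrix.drop f)[0]? = some row := by rw [hdrop]; rfl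
          rwa [List.getElem?_drop, Nat.add_zero] at h0
        simp [List.getD_eq_getElem?_getD, this]
      have hinner :
          (PySem.List.pyRange 0 (cols : Int) 1).foldl (fun pa c =>
            if PySem.List.pyGetD (PySem.List.pyGetD matrix ((f : Nat) : Int) []) c "" ≠ "0"
            then pySet2 pa ((f : Nat) : Int) c (1 + PySem.List.pyGetD (PySem.List.pyGetD pa (((f : Nat) : Int) - 1) []) c 0)
            else pa) pa
          = front ++ stepRow row prev :: List.replicate rest.length (List.replicate cols 0) := by
        rw [inner_gen (fun c => PySem.List.pyGetD (PySem.List.pyGetD matrix ((f : Nat) : Int) []) c "" ≠ "0")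
              (fun pr c => 1 + PySem.List.pyGetD pr c 0) ((f : Nat) : Int) (by omega) _ pa hpalen]
        rw [hrow0, hprevrow, hmrow]
        rw [foldl_setD_range (fun c => PySem.List.pyGetD row c "" ≠ "0")
              (fun c => 1 + PySem.List.pyGetD prev c 0) cols (List.replicate cols 0) (by simp)]
        have hmap : (List.range cols).map (fun (c : Nat) =>
              if PySem.List.pyGetD row (c : Int) "" ≠ "0"
              then 1 + PySem.List.pyGetD prev (c : Int) 0
              else (List.replicate cols (0 : Int)).getD c 0)
            = stepRow row prev := by
          rw [← hplen, ← rowmap_eq_stepRow row prev (by omega)]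
          apply List.map_congr_left
          intro c hc
          simp at hc
          simp [List.getD_eq_getElem?_getD, hc]
        rw [hmap]
        rw [PySem.List.pySetD_natCast, hpadef, List.set_append, if_neg (by omega)]
        simp [hfdef]
      rw [hinner]
      have hre : front ++ stepRow row prev :: List.replicate rest.length (List.replicate cols 0)
          = (front ++ [stepRow row prev]) ++ List.replicate rest.length (List.replicate cols 0) := by
        simp
      rw [hre]
      have e1 : ((f : Int) + 1) = (((front ++ [stepRow row prev]).length : Nat) : Int) := by
        simp only [List.length_append, List.length_cons, List.length_nil, ← hfdef]
        push_cast
        ring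
      have e2 : ((f : Int) + ((rest.length + 1 : Nat) : Int))
          = (((front ++ [stepRow row prev]).length : Nat) : Int) + ((rest.length : Nat) : Int) := by
        simp only [List.length_append, List.length_cons, List.length_nil, ← hfdef]
        push_cast
        ring
      rw [e1, e2,
          ih (front ++ [stepRow row prev]) (stepRow row prev) (by simp)
            (by
              have h := congrArg (List.drop 1) hdrop
              rw [List.drop_drop] at h
              simp only [List.drop_succ_cons, List.drop_zero] at h
              simp only [List.length_append, List.length_cons, List.length_nil]
              rw [← hfdef]
              exact h)
            List.getLast?_concat
            (by simp [stepRow]; omega)]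
      simp [scanRows]

-- the first A loop without a guard, as an instance of foldl_setD_range
theorem foldl_setD_range_all (g : Int → Int) (n : Nat) (L : List Int) (h : n ≤ L.length) :
    (PySem.List.pyRange 0 (n : Int) 1).foldl (fun h c => PySem.List.pySetD h c (g c)) L
      = (List.range n).map (fun (c : Nat) => g (c : Int)) ++ L.drop n := by
  have := foldl_setD_range (fun _ => True) g n L h
  simpa using this

-- A's value: row 0 of int()s, then the scan of stepRow
theorem a_char (row0 : List String) (rest : List (List String))
    (hlen : ∀ row ∈ (row0 :: rest : List (List String)), row0.length ≤ row.length) :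
    makePrefixArr (row0 :: rest)
      = (row0.map (fun s => (PySem.Int.ofStr? s).getD 0))
          :: scanRows (row0.map (fun s => (PySem.Int.ofStr? s).getD 0)) rest := by
  have hget0 : PySem.List.pyGetD (row0 :: rest) (0 : Int) [] = row0 := by
    rw [show (0 : Int) = ((0 : Nat) : Int) by norm_num, PySem.List.pyGetD_natCast]
    rfl
  simp only [makePrefixArr, hget0]
  -- the zero matrix
  have hconst : (PySem.List.pyRange 0 (((row0 :: rest).length : Nat) : Int) 1).map
        (fun _ => List.replicate ((row0.length : Int)).toNat (0 : Int))
      = List.replicate row0.length 0 :: List.replicate rest.length (List.replicate row0.length 0) := by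
    rw [List.map_const']
    simp [PySem.List.length_pyRange_one, List.replicate_succ]
  rw [hconst]
  -- the first loop fills row 0 with int(matrix[0][c])
  rw [foldl_pySet2_zero (fun c => ((PySem.Int.ofStr? (PySem.List.pyGetD row0 c "")).getD 0))]
  rw [foldl_setD_range_all _ row0.length (List.replicate row0.length 0) (by simp)]
  rw [map_range_pyGetD row0 "" (fun s => (PySem.Int.ofStr? s).getD 0)]
  simp only [List.drop_replicate, Nat.sub_self, List.replicate_zero, List.append_nil]
  -- the outer loop
  set prev0 : List Int := row0.map (fun s => (PySem.Int.ofStr? s).getD 0) with hprev0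
  have hout := outer_fold (row0 :: rest) row0.length hlen rest [prev0] prev0
    (by simp) (by simp) rfl (by simp [hprev0])
  simp only [List.length_cons, List.length_nil, Nat.zero_add, List.singleton_append] at hout
  rw [show (1 : Int) = ((1 : Nat) : Int) by norm_num] at hout ⊢
  rw [show ((((row0 :: rest).length : Nat)) : Int) = ((1 : Nat) : Int) + (rest.length : Int) by
        simp only [List.length_cons]; push_cast; ring]
  exact hout

-- stepRow applied to the vval row k gives the vval row k+1
theorem stepRow_vval_row (matrix : List (List String)) (cols k : Nat) (row : List String)
    (hrlen : cols ≤ row.length)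
    (hcell : ∀ c < cols, getCell matrix (k + 1) c = row.getD c "") :
    stepRow row ((List.range cols).map (fun c => vval matrix c k))
      = (List.range cols).map (fun c => vval matrix c (k + 1)) := by
  apply List.ext_getElem
  · simp [stepRow]; omega
  · intro i h1 h2
    have hic : i < cols := by simp at h2; omega
    have hir : i < row.length := by omega
    simp only [stepRow, List.getElem_map, List.getElem_zip, List.getElem_range]
    have hcelli : getCell matrix (k + 1) i = row[i] := by
      rw [hcell i hic, List.getD_eq_getElem _ _ hir]
    rw [show vval matrix i (k + 1)
          = if getCell matrix (k + 1) i ≠ "0" then vval matrix i k + 1 else 0 from rfl,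
        hcelli]

-- the scan computes the rows of the DP
theorem scanRows_vval (matrix : List (List String)) (cols : Nat)
    (hcols : ∀ row ∈ matrix, cols ≤ row.length) :
    ∀ (rest : List (List String)) (k : Nat), matrix.drop (k + 1) = rest →
    scanRows ((List.range cols).map (fun c => vval matrix c k)) rest
      = (List.range' (k + 1) rest.length).map (fun r => (List.range cols).map (fun c => vval matrix c r)) := by
  intro rest
  induction rest with
  | nil => intro k _; simp [scanRows]
  | cons row rest ih =>
      intro k hdrop
      have hrowmem : row ∈ matrix := by
        have := List.drop_sublist (k + 1) matrix
        rw [hdrop] at this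
        exact this.subset List.mem_cons_self
      have hrlen : cols ≤ row.length := hcols row hrowmem
      have hk1 : matrix[k + 1]? = some row := by
        have h0 : (matrix.drop (k + 1))[0]? = some row := by rw [hdrop]; rfl
        rwa [List.getElem?_drop, Nat.add_zero] at h0
      have hcell : ∀ c < cols, getCell matrix (k + 1) c = row.getD c "" := by
        intro c hc
        unfold getCell
        rw [PySem.List.pyGetD_natCast, PySem.List.pyGetD_natCast,
            show matrix.getD (k + 1) [] = row by rw [List.getD_eq_getElem?_getD, hk1]; rfl]
      have hstep := stepRow_vval_row matrix cols k row hrlen hcell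
      have hdrop' : matrix.drop (k + 1 + 1) = rest := by
        have h := congrArg (List.drop 1) hdrop
        rw [List.drop_drop] at h
        simpa [Nat.add_comm] using h
      simp only [scanRows, hstep, ih (k + 1) hdrop', List.length_cons, List.range'_succ,
        List.map_cons]

-- B's value equals A's row-0 ++ scan form
theorem b_char (row0 : List String) (rest : List (List String))
    (hlen : ∀ row ∈ (row0 :: rest : List (List String)), row0.length ≤ row.length) :
    makePrefixArr_alt (row0 :: rest)
      = (row0.map (fun s => (PySem.Int.ofStr? s).getD 0))
          :: scanRows (row0.map (fun s => (PySem.Int.ofStr? s).getD 0)) rest := by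
  have hget0 : PySem.List.pyGetD (row0 :: rest : List (List String)) (0 : Int) [] = row0 := by
    rw [show (0 : Int) = ((0 : Nat) : Int) by norm_num, PySem.List.pyGetD_natCast]
    rfl
  have hcell0 : ∀ c : Nat, getCell (row0 :: rest) 0 c = PySem.List.pyGetD row0 (c : Int) "" := by
    intro c
    unfold getCell
    rw [show ((0 : Nat) : Int) = (0 : Int) by norm_num, hget0]
  have hout0 : (List.range row0.length).map (fun c => (PySem.Int.ofStr? (getCell (row0 :: rest) 0 c)).getD 0)
      = row0.map (fun s => (PySem.Int.ofStr? s).getD 0) := by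
    rw [← map_range_pyGetD row0 "" (fun s => (PySem.Int.ofStr? s).getD 0)]
    apply List.map_congr_left
    intro c _
    rw [hcell0]
  have hprev0 : row0.map (fun s => (PySem.Int.ofStr? s).getD 0)
      = (List.range row0.length).map (fun c => vval (row0 :: rest) c 0) := by
    rw [← hout0]
    apply List.map_congr_left
    intro c _
    rfl
  have hscan := scanRows_vval (row0 :: rest) row0.length (by simpa using hlen) rest 0 (by simp)
  simp only [Nat.zero_add] at hscan
  simp only [makePrefixArr_alt, hget0, List.length_cons, Nat.add_sub_cancel]
  rw [hout0, hprev0, hscan]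
  congr 1
  apply List.map_congr_left
  intro r _
  apply List.map_congr_left
  intro c _
  exact cellHeight_eq_vval (row0 :: rest) r c

-- ===== VERDICT (by name: the statement is the Claim_ definition above) =====
theorem makePrefixArr_spec : Claim_equal_makePrefixArr := by
  intro matrix _ hpre
  obtain ⟨hne, hlen, -⟩ := hpre
  unfold Spec_makePrefixArr
  match matrix, hne with
  | row0 :: rest, _ =>
    rw [a_char row0 rest (by simpa using hlen), b_char row0 rest (by simpa using hlen)]
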